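-- pv_equiv track=rewrite | github.com/Mikescher/www.mikescher.com | www/statics/aoc/2017/09_solution-1.py | read_garbage
-- ===== SOURCE A (Python) =====
-- def read_garbage(data: str):
--     assert data[0] == '<'
--     pos = 1
--
--     escaped = False
--     while True:
--         if escaped:
--             escaped = False
--         elif data[pos] == '>':
--             return data[1:pos-1], pos+1
--         elif data[pos] == '!':
--             escaped = True
--         pos+=1
-- ===== SOURCE B (Python) =====
-- def read_garbage(data: str):
--     assert data[0] == '<'
--     # stage 1: escape table -- esc[i] is True iff position i is consumed by a preceding '!'
--     esc = [False, False]
--     for i in range(1, len(data)):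
--         esc.append(data[i] == '!' and not esc[i])
--     # stage 2: the garbage closes at the first unescaped '>'
--     end = next(i for i in range(1, len(data)) if data[i] == '>' and not esc[i])
--     return data[1:end-1], end + 1
-- ===== Notes on version B (the rewrite author's own statement) =====
-- stated objective: alternative
-- what changed: Replaced A's single-pass flag-carrying state machine by two staged passes: first precompute an escape table esc[i] for every position, then search for the first unescaped '>'.
import Mathlib
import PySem

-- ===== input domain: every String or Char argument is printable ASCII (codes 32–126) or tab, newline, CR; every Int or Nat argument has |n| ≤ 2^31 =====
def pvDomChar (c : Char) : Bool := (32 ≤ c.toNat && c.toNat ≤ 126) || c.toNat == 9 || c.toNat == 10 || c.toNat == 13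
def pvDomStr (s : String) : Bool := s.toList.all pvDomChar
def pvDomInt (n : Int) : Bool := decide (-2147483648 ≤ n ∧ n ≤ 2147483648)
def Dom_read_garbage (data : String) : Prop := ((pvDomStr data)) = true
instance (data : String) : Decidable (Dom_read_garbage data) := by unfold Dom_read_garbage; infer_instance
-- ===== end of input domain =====

-- B replaces A's single-pass escape-flag state machine by two staged passes (build an escape table, then find the first unescaped '>'); alternative decomposition, same outputs.
-- ===== PORT A =====
-- A's while-True loop over data[pos] with its escape flag, as structural recursion on
-- the not-yet-read suffix 'rest' of data (rest = data[pos:]); the [] case is the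
-- IndexError on unterminated input, excluded by Pre_.
def readGarbageLoopA (full : List Char) (rest : List Char) (pos : Int) (escaped : Bool) :
    String × Int :=
  match rest with
  | [] => ("", 0)  -- IndexError in Python: outside Pre_
  | c :: rs =>
    if escaped then readGarbageLoopA full rs (pos + 1) false
    else if c = '>' then (String.ofList (PySem.List.slice full (some 1) (some (pos - 1))), pos + 1)
    else if c = '!' then readGarbageLoopA full rs (pos + 1) true
    else readGarbageLoopA full rs (pos + 1) false

def read_garbage (data : String) : String × Int :=
  match data.toList with
  | c :: rest =>
    if c = '<' then readGarbageLoopA data.toList rest 1 false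
    else ("", 0)  -- AssertionError in Python: outside Pre_
  | [] => ("", 0)  -- IndexError in Python: outside Pre_

-- ===== PORT B =====
-- stage 1 of Source B: the for-loop appending to esc, as a foldl over range(1, len(data)).
def escStep (L : List Char) (acc : List Bool) (i : Int) : List Bool :=
  acc ++ [(PySem.List.pyGetD L i ' ' == '!') && !(PySem.List.pyGetD acc i false)]

def read_garbage_alt (data : String) : String × Int :=
  match data.toList with
  | c :: _ =>
    if c = '<' then
      let L := data.toList
      let esc : List Bool :=
        (PySem.List.pyRange 1 (L.length : Int) 1).foldl (escStep L) [false, false]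
      -- stage 2 of Source B: next(i for i in range(1, len(data)) if data[i] == '>' and not esc[i])
      match (PySem.List.pyRange 1 (L.length : Int) 1).find?
          (fun i => PySem.List.pyGetD L i ' ' == '>' && !(PySem.List.pyGetD esc i false)) with
      | some e => (String.ofList (PySem.List.slice L (some 1) (some (e - 1))), e + 1)
      | none => ("", 0)  -- StopIteration in Python: outside Pre_
    else ("", 0)  -- AssertionError in Python: outside Pre_
  | [] => ("", 0)  -- IndexError in Python: outside Pre_

-- ===== PRECONDITION & SPEC =====
-- Python A raises on inputs not starting with '<' (AssertionError, or IndexError on "")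
-- and on garbage with no closing unescaped '>' (IndexError); Pre_ admits exactly the
-- inputs where A returns: head '<' followed by a suffix containing an unescaped '>'.
def garbageCloses : List Char → Bool
  | [] => false
  | '>' :: _ => true
  | '!' :: [] => false
  | '!' :: _ :: rest => garbageCloses rest
  | _ :: rest => garbageCloses rest

def Pre_read_garbage (data : String) : Prop :=
  data.toList ≠ [] ∧ data.toList.headI = '<' ∧ garbageCloses data.toList.tail = true

instance (data : String) : Decidable (Pre_read_garbage data) := by
  unfold Pre_read_garbage; infer_instance

def pvWitness_read_garbage : String := "<ab!>c>x"

def Spec_read_garbage (data : String) (out : String × Int) : Prop := out = read_garbage_alt data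
instance (data : String) (out : String × Int) : Decidable (Spec_read_garbage data out) := by unfold Spec_read_garbage; infer_instance

-- ===== CLAIM (what is proved, stated in full; the proofs are below) =====
def Claim_equal_read_garbage : Prop := ∀ (data : String), Dom_read_garbage data → Pre_read_garbage data → Spec_read_garbage data (read_garbage data)

-- ===== LEMMAS AND PROOFS =====

-- the escape recurrence both programs compute: escF L i = "position i of L is escaped"
def escF (L : List Char) : Nat → Bool
  | 0 => false
  | i + 1 => if i = 0 then false else (L.getD i ' ' == '!') && !escF L i

-- stage-1 characterization: after the fold up to m, the table has length m+1 and entry i is escF L i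
theorem escList_spec (L : List Char) :
    ∀ m : Nat, 1 ≤ m → m ≤ L.length →
      ((PySem.List.pyRange 1 (m : Int) 1).foldl (escStep L) [false, false]).length = m + 1 ∧
      ∀ i : Nat, i ≤ m →
        ((PySem.List.pyRange 1 (m : Int) 1).foldl (escStep L) [false, false]).getD i false = escF L i := by
  intro m
  induction m with
  | zero => intro h; omega
  | succ m ih =>
    intro _ hle
    by_cases hm : m = 0
    · subst hm
      rw [show ((0 + 1 : Nat) : Int) = 1 by norm_num,
        PySem.List.pyRange_one_eq_nil (by norm_num)]
      refine ⟨rfl, ?_⟩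
      intro i hi
      interval_cases i <;> rfl
    · have hm1 : 1 ≤ m := Nat.one_le_iff_ne_zero.mpr hm
      obtain ⟨hlen, hget⟩ := ih hm1 (by omega)
      have hsplit : PySem.List.pyRange 1 ((m + 1 : Nat) : Int) 1 =
          PySem.List.pyRange 1 (m : Int) 1 ++ [(m : Int)] := by
        push_cast
        exact PySem.List.pyRange_one_succ_right (by exact_mod_cast hm1)
      set E := (PySem.List.pyRange 1 (m : Int) 1).foldl (escStep L) [false, false] with hE
      have hfold : (PySem.List.pyRange 1 ((m + 1 : Nat) : Int) 1).foldl (escStep L) [false, false]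
          = E ++ [(L.getD m ' ' == '!') && !escF L m] := by
        rw [hsplit, List.foldl_append]
        show escStep L E (m : Int) = _
        unfold escStep
        rw [PySem.List.pyGetD_natCast, PySem.List.pyGetD_natCast, hget m le_rfl]
      rw [hfold]
      have hx : ((L.getD m ' ' == '!') && !escF L m) = escF L (m + 1) := by
        simp [escF, hm]
      constructor
      · simp [hlen]
      · intro i hi
        rcases Nat.lt_or_ge i (m + 1) with hlt | hge
        · rw [List.getD_append _ _ _ _ (by omega), hget i (by omega)]
        · have hieq : i = m + 1 := by omega
          subst hieq
          rw [List.getD_append_right _ _ _ _ (hlen ▸ le_rfl), hlen, Nat.sub_self]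
          simpa using hx

-- main loop lemma: A's loop from position i with flag escF L i computes B's search from i
theorem loopA_eq_find (L : List Char) :
    ∀ k i : Nat, 1 ≤ i → L.length - i = k →
      readGarbageLoopA L (L.drop i) (i : Int) (escF L i) =
        (match (PySem.List.pyRange (i : Int) (L.length : Int) 1).find?
            (fun j => PySem.List.pyGetD L j ' ' == '>' && !escF L j.toNat) with
        | some e => (String.ofList (PySem.List.slice L (some 1) (some (e - 1))), e + 1)
        | none => ("", 0)) := by
  intro k
  induction k with
  | zero =>
    intro i _ hk
    have hge : L.length ≤ i := by omega
    rw [List.drop_eq_nil_of_le hge,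
      PySem.List.pyRange_one_eq_nil (by exact_mod_cast hge)]
    rfl
  | succ k ih =>
    intro i hi hk
    have hlt : i < L.length := by omega
    have hdrop : L.drop i = L[i] :: L.drop (i + 1) := List.drop_eq_getElem_cons hlt
    have hrange : PySem.List.pyRange (i : Int) (L.length : Int) 1 =
        (i : Int) :: PySem.List.pyRange ((i : Int) + 1) (L.length : Int) 1 :=
      PySem.List.pyRange_one_cons (by exact_mod_cast hlt)
    have hLi : PySem.List.pyGetD L (i : Int) ' ' = L[i] := by
      rw [PySem.List.pyGetD_natCast]
      exact List.getD_eq_getElem L ' ' hlt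
    have hcast : ((i : Int) + 1) = ((i + 1 : Nat) : Int) := by push_cast; ring
    have hesc1 : escF L (i + 1) = ((L.getD i ' ' == '!') && !escF L i) := by
      have hne : i ≠ 0 := by omega
      simp [escF, hne]
    have hgetD : L.getD i ' ' = L[i] := List.getD_eq_getElem L ' ' hlt
    rw [hdrop, hrange, readGarbageLoopA]
    by_cases hE : escF L i
    · -- escaped: clear the flag, position i is skipped by the search too
      rw [if_pos hE, List.find?_cons_of_neg (by simp [hLi, hE])]
      have : (false : Bool) = escF L (i + 1) := by simp [hesc1, hE]
      rw [this, hcast]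
      exact ih (i + 1) (by omega) (by omega)
    · rw [if_neg hE]
      by_cases hgt : L[i] = '>'
      · rw [if_pos hgt, List.find?_cons_of_pos (by simp [hLi, hgt, hE])]
      · rw [if_neg hgt, List.find?_cons_of_neg (by simp [hLi, hgt])]
        by_cases hex : L[i] = '!'
        · rw [if_pos hex]
          have : (true : Bool) = escF L (i + 1) := by
            simp [hesc1, hE, hex, List.getElem?_eq_getElem hlt]
          rw [this, hcast]
          exact ih (i + 1) (by omega) (by omega)
        · rw [if_neg hex]
          have : (false : Bool) = escF L (i + 1) := by
            simp [hesc1, hex, List.getElem?_eq_getElem hlt]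
          rw [this, hcast]
          exact ih (i + 1) (by omega) (by omega)

-- ===== VERDICT (by name: the statement is the Claim_ definition above) =====
-- pointwise-equal predicates give the same find? result
theorem find?_congr_mem {α : Type} (l : List α) (p q : α → Bool)
    (h : ∀ x ∈ l, p x = q x) : l.find? p = l.find? q := by
  induction l with
  | nil => rfl
  | cons a t ih =>
    rcases hpa : p a with hf | ht
    · rw [List.find?_cons_of_neg (by simp [hpa]),
        List.find?_cons_of_neg (by simp [← h a List.mem_cons_self, hpa]),
        ih fun x hx => h x (List.mem_cons_of_mem a hx)]
    · rw [List.find?_cons_of_pos hpa,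
        List.find?_cons_of_pos (by rw [← h a List.mem_cons_self, hpa])]

theorem read_garbage_spec : Claim_equal_read_garbage := by
  intro data _ hpre
  obtain ⟨hne, hhead, _⟩ := hpre
  unfold Spec_read_garbage
  match h : data.toList with
  | [] => exact absurd h hne
  | c :: rest =>
    have hc : c = '<' := by rw [h] at hhead; simpa using hhead
    subst hc
    set L := data.toList with hL
    have hlen1 : 1 ≤ L.length := by rw [h]; simp
    have hdrop1 : rest = L.drop 1 := by rw [h]; rfl
    have hA : read_garbage data = readGarbageLoopA L rest 1 false := by
      unfold read_garbage
      rw [← hL, h]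
      simp
    have hesc0 : (false : Bool) = escF L 1 := rfl
    obtain ⟨hElen, hEget⟩ := escList_spec L L.length hlen1 le_rfl
    have hBfind :
        (PySem.List.pyRange 1 (L.length : Int) 1).find?
            (fun j => PySem.List.pyGetD L j ' ' == '>' &&
              !(PySem.List.pyGetD ((PySem.List.pyRange 1 (L.length : Int) 1).foldl (escStep L) [false, false]) j false))
          = (PySem.List.pyRange 1 (L.length : Int) 1).find?
            (fun j => PySem.List.pyGetD L j ' ' == '>' && !escF L j.toNat) := by
      apply find?_congr_mem
      intro j hj
      have hjb := (PySem.List.mem_pyRange_one).mp hj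
      obtain ⟨jn, rfl⟩ : ∃ jn : Nat, j = (jn : Int) := ⟨j.toNat, by omega⟩
      have hjn : jn ≤ L.length := by omega
      rw [PySem.List.pyGetD_natCast
        ((PySem.List.pyRange 1 (L.length : Int) 1).foldl (escStep L) [false, false]),
        hEget jn hjn, Int.toNat_natCast]
    have hB : read_garbage_alt data =
        (match (PySem.List.pyRange 1 (L.length : Int) 1).find?
            (fun j => PySem.List.pyGetD L j ' ' == '>' && !escF L j.toNat) with
        | some e => (String.ofList (PySem.List.slice L (some 1) (some (e - 1))), e + 1)
        | none => ("", 0)) := by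
      unfold read_garbage_alt
      rw [← hL, h]
      simp only [← h]
      rw [← hBfind]
      rfl
    rw [hA, hB, hdrop1, show (1 : Int) = ((1 : Nat) : Int) by rfl, hesc0]
    exact loopA_eq_find L (L.length - 1) 1 le_rfl rfl
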